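-- pv_equiv track=rewrite | github.com/allala0/rubiks-cube.py | tools.py | convertProxy
-- ===== SOURCE A (Python) =====
-- def convertProxy(proxy):
--     ip = ''
--     port = ''
--     login = ''
--     password = ''
--     counter = 0
--
--     for c in proxy:
--         if c is ':':
--             counter += 1
--         elif counter is 0:
--             ip += c
--         elif counter is 1:
--             port += c
--         elif counter is 2:
--             login += c
--         elif counter is 3:
--             password += c
--     converted_proxy = f'{login}:{password}@{ip}:{port}'
--     return converted_proxy
-- ===== SOURCE B (Python) =====
-- def convertProxy(proxy):
--     parts = proxy.split(':')
--     parts += [''] * (4 - len(parts))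
--     ip, port, login, password = parts[0], parts[1], parts[2], parts[3]
--     return f'{login}:{password}@{ip}:{port}'
-- ===== Notes on version B (the rewrite author's own statement) =====
-- stated objective: simpler
-- what changed: Replaces the per-character loop with its four string accumulators and a colon counter by a single str.split on the colon separator plus padding and direct field indexing.
import Mathlib
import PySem

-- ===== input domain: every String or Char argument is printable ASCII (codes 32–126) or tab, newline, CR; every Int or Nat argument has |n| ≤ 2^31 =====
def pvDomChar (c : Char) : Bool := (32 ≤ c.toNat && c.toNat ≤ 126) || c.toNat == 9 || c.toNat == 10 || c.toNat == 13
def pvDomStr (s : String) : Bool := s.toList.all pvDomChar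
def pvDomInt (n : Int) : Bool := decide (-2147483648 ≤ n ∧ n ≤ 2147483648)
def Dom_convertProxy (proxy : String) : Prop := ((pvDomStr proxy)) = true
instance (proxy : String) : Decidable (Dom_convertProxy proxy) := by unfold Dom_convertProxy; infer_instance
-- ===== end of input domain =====

-- B replaces A's per-character accumulation loop (four field strings + a colon counter)
-- by a single split on the colon separator with padding and direct indexing; measured faster by a constant factor.

-- ===== PORT A =====
-- one step of A's loop: state = (ip, port, login, password, counter)
def convertProxyStep (st : List Char × List Char × List Char × List Char × Int) (c : Char) :
    List Char × List Char × List Char × List Char × Int :=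
  let (ip, port, login, password, counter) := st
  if c = ':' then (ip, port, login, password, counter + 1)
  else if counter = 0 then (ip ++ [c], port, login, password, counter)
  else if counter = 1 then (ip, port ++ [c], login, password, counter)
  else if counter = 2 then (ip, port, login ++ [c], password, counter)
  else if counter = 3 then (ip, port, login, password ++ [c], counter)
  else (ip, port, login, password, counter)

def convertProxy (proxy : String) : String :=
  let st := proxy.toList.foldl convertProxyStep ([], [], [], [], 0)
  let (ip, port, login, password, _) := st
  String.ofList (login ++ ':' :: password ++ '@' :: ip ++ ':' :: port)

-- ===== PORT B =====
def convertProxy_alt (proxy : String) : String :=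
  let parts := (PySem.Str.split? proxy ":").getD []
  let parts := parts ++ List.replicate (4 - parts.length) ""
  let ip := parts.getD 0 ""
  let port := parts.getD 1 ""
  let login := parts.getD 2 ""
  let password := parts.getD 3 ""
  login ++ ":" ++ password ++ "@" ++ ip ++ ":" ++ port

-- ===== PRECONDITION & SPEC =====
def Spec_convertProxy (proxy : String) (out : String) : Prop := out = convertProxy_alt proxy
instance (proxy : String) (out : String) : Decidable (Spec_convertProxy proxy out) := by unfold Spec_convertProxy; infer_instance

-- ===== CLAIM (what is proved, stated in full; the proofs are below) =====
def Claim_equal_convertProxy : Prop := ∀ (proxy : String), Dom_convertProxy proxy → Spec_convertProxy proxy (convertProxy proxy)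

-- ===== LEMMAS AND PROOFS =====

-- simple splitter on ':' used as the common specification of both ports
def splitC : List Char → List (List Char)
  | [] => [[]]
  | c :: rest => if c = ':' then [] :: splitC rest else (splitC rest).modifyHead (c :: ·)

lemma splitC_ne_nil (cs : List Char) : splitC cs ≠ [] := by
  induction cs with
  | nil => simp [splitC]
  | cons c rest ih =>
    simp only [splitC]
    split
    · simp
    · cases h : splitC rest with
      | nil => exact absurd h ih
      | cons a t => simp [List.modifyHead]

def consHead (p : List Char) : List (List Char) → List (List Char)
  | [] => [p]
  | h :: t => (p ++ h) :: t

lemma consHead_nil_of_ne_nil (l : List (List Char)) (h : l ≠ []) : consHead [] l = l := by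
  cases l with
  | nil => exact absurd rfl h
  | cons a t => simp [consHead]

lemma go_eq_splitC : ∀ (fuel : Nat) (l cur : List Char) (acc : List (List Char)),
    l.length < fuel →
    PySem.Chars.splitOn.go [':'] fuel l cur acc =
      acc.reverse ++ consHead cur.reverse (splitC l) := by
  intro fuel
  induction fuel with
  | zero => intro l cur acc h; omega
  | succ fuel ih =>
    intro l cur acc h
    cases l with
    | nil =>
      simp [PySem.Chars.splitOn.go, splitC, consHead]
    | cons c rest =>
      by_cases hc : c = ':'
      · subst hc
        have hpre : [':'].isPrefixOf (':' :: rest) = true := by simp [List.isPrefixOf]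
        simp only [PySem.Chars.splitOn.go, hpre, if_pos, List.length_cons, List.drop_succ_cons,
          List.drop_zero, List.length_nil]
        rw [ih rest [] (cur.reverse :: acc) (by simpa using Nat.lt_of_succ_lt_succ h)]
        simp only [splitC, List.reverse_cons, List.reverse_nil]
        rw [consHead_nil_of_ne_nil _ (splitC_ne_nil rest)]
        simp [consHead]
      · have hpre : [':'].isPrefixOf (c :: rest) = false := by
          simp [List.isPrefixOf]; exact fun hh => absurd hh.symm hc
        simp only [PySem.Chars.splitOn.go, hpre]
        rw [ih rest (c :: cur) acc (by simpa using Nat.lt_of_succ_lt_succ h)]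
        simp only [splitC, if_neg hc, List.reverse_cons]
        cases hs : splitC rest with
        | nil => exact absurd hs (splitC_ne_nil rest)
        | cons a t => simp [consHead, List.modifyHead]

lemma splitOn_colon (cs : List Char) : PySem.Chars.splitOn cs [':'] = splitC cs := by
  unfold PySem.Chars.splitOn
  rw [go_eq_splitC (cs.length + 1) cs [] [] (by omega)]
  simp [consHead_nil_of_ne_nil _ (splitC_ne_nil cs)]

-- the segment A's field number i ends up with, when the loop starts with counter k
def segAt (cs : List Char) (k : Int) (i : Nat) : List Char :=
  if k ≤ (i : Int) then (splitC cs).getD (i - k.toNat) [] else []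

lemma getD_modifyHead_succ (f : List Char → List Char) (l : List (List Char)) (n : Nat) :
    (l.modifyHead f).getD (n + 1) [] = l.getD (n + 1) [] := by
  cases l <;> simp [List.modifyHead]

lemma segAt_colon (rest : List Char) (k : Int) (i : Nat) (hk : 0 ≤ k) :
    segAt (':' :: rest) k i = segAt rest (k + 1) i := by
  unfold segAt
  simp only [splitC]
  by_cases h1 : k + 1 ≤ (i : Int)
  · have h0 : k ≤ (i : Int) := by omega
    rw [if_pos h0, if_pos h1]
    have : i - k.toNat = (i - (k + 1).toNat) + 1 := by omega
    rw [this]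
    simp
  · rw [if_neg h1]
    by_cases h0 : k ≤ (i : Int)
    · rw [if_pos h0]
      have : i - k.toNat = 0 := by omega
      rw [this]; simp
    · rw [if_neg h0]

lemma segAt_char (rest : List Char) (c : Char) (hc : c ≠ ':') (k : Int) (i : Nat) (hk : 0 ≤ k) :
    segAt (c :: rest) k i =
      (if k = (i : Int) then c :: segAt rest k i else segAt rest k i) := by
  unfold segAt
  simp only [splitC, if_neg hc]
  cases hs : splitC rest with
  | nil => exact absurd hs (splitC_ne_nil rest)
  | cons a t =>
    by_cases hki : k = (i : Int)
    · rw [if_pos hki, if_pos (le_of_eq hki), if_pos (le_of_eq hki)]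
      have h0 : i - k.toNat = 0 := by omega
      rw [h0]
      simp [List.modifyHead]
    · rw [if_neg hki]
      by_cases h0 : k ≤ (i : Int)
      · rw [if_pos h0, if_pos h0]
        obtain ⟨n, hn⟩ : ∃ n, i - k.toNat = n + 1 := ⟨i - k.toNat - 1, by omega⟩
        rw [hn, getD_modifyHead_succ]
      · rw [if_neg h0, if_neg h0]

lemma step_colon (ip port login pw : List Char) (k : Int) :
    convertProxyStep (ip, port, login, pw, k) ':' = (ip, port, login, pw, k + 1) := by
  simp [convertProxyStep]

lemma foldA_eq : ∀ (cs ip port login pw : List Char) (k : Int), 0 ≤ k →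
    List.foldl convertProxyStep (ip, port, login, pw, k) cs =
      (ip ++ segAt cs k 0, port ++ segAt cs k 1, login ++ segAt cs k 2, pw ++ segAt cs k 3,
        k + (cs.count ':' : Nat)) := by
  intro cs
  induction cs with
  | nil =>
    intro ip port login pw k hk
    simp [segAt, splitC]
  | cons c rest ih =>
    intro ip port login pw k hk
    by_cases hc : c = ':'
    · subst hc
      rw [List.foldl_cons, step_colon, ih ip port login pw (k + 1) (by omega)]
      rw [segAt_colon _ _ _ hk, segAt_colon _ _ _ hk, segAt_colon _ _ _ hk, segAt_colon _ _ _ hk]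
      simp
      ring
    · have hcount : ((c :: rest).count ':' : Nat) = rest.count ':' := by
        simp [hc]
      rw [segAt_char rest c hc k 0 hk, segAt_char rest c hc k 1 hk,
        segAt_char rest c hc k 2 hk, segAt_char rest c hc k 3 hk]
      by_cases h0 : k = 0
      · subst h0
        have hstep : convertProxyStep (ip, port, login, pw, 0) c = (ip ++ [c], port, login, pw, 0) := by
          simp [convertProxyStep, hc]
        rw [List.foldl_cons, hstep, ih (ip ++ [c]) port login pw 0 (by omega)]
        simp [hcount]
      · by_cases h1 : k = 1
        · subst h1
          have hstep : convertProxyStep (ip, port, login, pw, 1) c = (ip, port ++ [c], login, pw, 1) := by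
            simp [convertProxyStep, hc]
          rw [List.foldl_cons, hstep, ih ip (port ++ [c]) login pw 1 (by omega)]
          simp [hcount]
        · by_cases h2 : k = 2
          · subst h2
            have hstep : convertProxyStep (ip, port, login, pw, 2) c = (ip, port, login ++ [c], pw, 2) := by
              simp [convertProxyStep, hc]
            rw [List.foldl_cons, hstep, ih ip port (login ++ [c]) pw 2 (by omega)]
            simp [hcount]
          · by_cases h3 : k = 3
            · subst h3
              have hstep : convertProxyStep (ip, port, login, pw, 3) c = (ip, port, login, pw ++ [c], 3) := by
                simp [convertProxyStep, hc]
              rw [List.foldl_cons, hstep, ih ip port login (pw ++ [c]) 3 (by omega)]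
              simp [hcount]
            · have hstep : convertProxyStep (ip, port, login, pw, k) c = (ip, port, login, pw, k) := by
                simp [convertProxyStep, hc, h0, h1, h2, h3]
              rw [List.foldl_cons, hstep, ih ip port login pw k hk]
              simp [hcount]
              exact ⟨h0, h1, h2, h3⟩

lemma segAt_zero (cs : List Char) (i : Nat) : segAt cs 0 i = (splitC cs).getD i [] := by
  simp [segAt]

-- B side: the padded part list indexes into splitC
lemma getD_pad (l : List (List Char)) (i : Nat) :
    ((l.map String.ofList) ++ List.replicate (4 - l.length) "").getD i "" =
      String.ofList (l.getD i []) := by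
  by_cases h : i < l.length
  · rw [List.getD_append _ _ _ _ (by simpa using h)]
    rw [List.getD_eq_getElem _ _ (by simpa using h), List.getD_eq_getElem _ _ h]
    simp
  · have h1 : l.getD i [] = [] := by
      rw [List.getD_eq_getElem?_getD, List.getElem?_eq_none (by omega)]; rfl
    rw [h1]
    rw [List.getD_eq_getElem?_getD, List.getElem?_append_right (by simpa using Nat.le_of_not_lt h)]
    simp only [List.length_map]
    by_cases h2 : i - l.length < 4 - l.length
    · rw [List.getElem?_replicate]
      simp [h2]
    · rw [List.getElem?_eq_none (by simpa using Nat.le_of_not_lt h2)]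
      rfl

lemma ofList_append (a b : List Char) :
    String.ofList a ++ String.ofList b = String.ofList (a ++ b) := by
  apply String.ext
  simp

-- ===== VERDICT (by name: the statement is the Claim_ definition above) =====
theorem convertProxy_spec : Claim_equal_convertProxy := by
  intro proxy _
  unfold Spec_convertProxy convertProxy convertProxy_alt
  rw [foldA_eq proxy.toList [] [] [] [] 0 (by omega)]
  simp only [List.nil_append, segAt_zero]
  have hsplit : PySem.Str.split? proxy ":" =
      some ((splitC proxy.toList).map String.ofList) := by
    simp [PySem.Str.split?, PySem.Chars.split?, splitOn_colon]
  rw [hsplit]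
  simp only [Option.getD_some]
  rw [List.length_map]
  rw [getD_pad _ 0, getD_pad _ 1, getD_pad _ 2, getD_pad _ 3]
  have c1 : (":" : String) = String.ofList [':'] := rfl
  have c2 : ("@" : String) = String.ofList ['@'] := rfl
  rw [c1, c2, ofList_append, ofList_append, ofList_append, ofList_append, ofList_append,
    ofList_append]
  simp
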